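-- pv_equiv track=rewrite | github.com/eyereasoner/eye | eyelet/ocelli/input/gps.py | stagecount
-- ===== SOURCE A (Python) =====
-- from typing import Callable, List, Sequence, Tuple
--
-- def stagecount(maps: Sequence[str]) -> int:
--     """Return the number of *stages* in a path, where a stage is a maximal
--     subsequence of identical map identifiers (exactly the behaviour of the
--     three gps:stagecount rules).
--     """
--
--     if not maps:
--         return 0
--
--     count = 1
--     for prev, nxt in zip(maps, maps[1:]):
--         if prev != nxt:
--             count += 1
--     return count
-- ===== SOURCE B (Python) =====
-- def stagecount(maps):
--     """Divide and conquer: split the path in half, count stages in each half,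
--     and subtract one if the run at the split boundary is shared by both halves."""
--     n = len(maps)
--     if n <= 1:
--         return n
--     mid = n // 2
--     join = 1 if maps[mid - 1] == maps[mid] else 0
--     return stagecount(maps[:mid]) + stagecount(maps[mid:]) - join
-- ===== Notes on version B (the rewrite author's own statement) =====
-- stated objective: alternative
-- what changed: Replaces A's single linear pass over zipped adjacent pairs with a divide-and-conquer recursion: split the list in half, count stages in each half recursively, and subtract one when the boundary run spans the split.
import Mathlib
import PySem

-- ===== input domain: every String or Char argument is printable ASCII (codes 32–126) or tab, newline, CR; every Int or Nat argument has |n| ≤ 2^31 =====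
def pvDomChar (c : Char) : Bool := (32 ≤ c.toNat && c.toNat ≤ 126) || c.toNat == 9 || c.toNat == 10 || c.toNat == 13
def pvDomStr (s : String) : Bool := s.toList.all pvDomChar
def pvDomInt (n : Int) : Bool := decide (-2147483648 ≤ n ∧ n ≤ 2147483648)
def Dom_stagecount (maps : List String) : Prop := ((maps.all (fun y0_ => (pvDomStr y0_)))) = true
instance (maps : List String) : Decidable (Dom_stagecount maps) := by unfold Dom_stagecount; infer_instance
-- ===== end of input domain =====

-- B counts stages by divide and conquer (halve, recurse, merge at the split) instead of A's linear boundary-counting pass; alternative structure, not faster.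
-- ===== PORT A =====
-- A: if empty return 0, else fold over zipped adjacent pairs, incrementing at each boundary
def stagecount (maps : List String) : Int :=
  if maps = [] then 0
  else (maps.zip maps.tail).foldl (fun count pn => if pn.1 ≠ pn.2 then count + 1 else count) 1

-- ===== PORT B =====
-- B: split at the midpoint, recurse on both halves, subtract 1 if the boundary run spans the split
def stagecount_alt (maps : List String) : Int :=
  if maps.length ≤ 1 then (maps.length : Int)
  else
    let mid := maps.length / 2
    let join : Int := if maps[mid - 1]? = maps[mid]? then 1 else 0
    stagecount_alt (maps.take mid) + stagecount_alt (maps.drop mid) - join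
termination_by maps.length
decreasing_by
  · simp only [List.length_take]
    omega
  · simp only [List.length_drop]
    omega

-- ===== PRECONDITION & SPEC =====
def Spec_stagecount (maps : List String) (out : Int) : Prop := out = stagecount_alt maps
instance (maps : List String) (out : Int) : Decidable (Spec_stagecount maps out) := by unfold Spec_stagecount; infer_instance

-- ===== CLAIM (what is proved, stated in full; the proofs are below) =====
def Claim_equal_stagecount : Prop := ∀ (maps : List String), Dom_stagecount maps → Spec_stagecount maps (stagecount maps)

-- ===== LEMMAS AND PROOFS =====

-- reference run count: simple structural recursion, the midpoint between the two ports
def runsRef : List String → Int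
  | [] => 0
  | [_] => 1
  | x :: y :: t => (if x ≠ y then 1 else 0) + runsRef (y :: t)

theorem runsRef_append (b : List String) (y : String) :
    ∀ a : List String, runsRef (a ++ y :: b)
      = runsRef a + runsRef (y :: b) - (if a.getLast? = some y then 1 else 0) := by
  intro a
  induction a with
  | nil => simp [runsRef]
  | cons x a' ih =>
      cases a' with
      | nil =>
          simp only [List.nil_append, List.cons_append, runsRef, List.getLast?_singleton]
          by_cases h : x = y <;> simp [h]
      | cons z a'' =>
          simp only [List.cons_append] at ih ⊢
          have : runsRef (x :: z :: (a'' ++ y :: b))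
              = (if x ≠ z then 1 else 0) + runsRef (z :: (a'' ++ y :: b)) := rfl
          rw [this, ih]
          have hl : (x :: z :: a'').getLast? = (z :: a'').getLast? := by
            simp [List.getLast?_cons_cons]
          rw [hl]
          have : runsRef (x :: z :: a'') = (if x ≠ z then 1 else 0) + runsRef (z :: a'') := rfl
          rw [this]
          ring

theorem alt_eq_ref (maps : List String) : stagecount_alt maps = runsRef maps := by
  induction hn : maps.length using Nat.strong_induction_on generalizing maps with
  | _ n ih =>
    match maps with
    | [] => simp [stagecount_alt, runsRef]
    | [x] => simp [stagecount_alt, runsRef]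
    | x :: y :: t =>
      subst hn
      have hlen : (x :: y :: t).length = t.length + 2 := by simp
      rw [stagecount_alt]
      have hn2 : ¬ (x :: y :: t).length ≤ 1 := by simp
      rw [if_neg hn2]
      dsimp only
      set l := x :: y :: t with hl
      set mid := l.length / 2 with hmid
      have hmid1 : 1 ≤ mid := by
        have : 2 ≤ l.length := by simp [hl]
        omega
      have hmidlt : mid < l.length := by
        have : 2 ≤ l.length := by simp [hl]
        omega
      have htake : stagecount_alt (l.take mid) = runsRef (l.take mid) := by
        apply ih (l.take mid).length _ _ rfl
        simp only [List.length_take]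
        omega
      have hdrop : stagecount_alt (l.drop mid) = runsRef (l.drop mid) := by
        apply ih (l.drop mid).length _ _ rfl
        simp only [List.length_drop]
        omega
      rw [htake, hdrop]
      -- drop mid = l[mid] :: drop (mid+1)
      obtain ⟨ymid, hymid⟩ : ∃ z, l[mid]? = some z := by
        exact ⟨l[mid], List.getElem?_eq_getElem hmidlt⟩
      have hdropeq : l.drop mid = ymid :: l.drop (mid + 1) := by
        have : (l.drop mid).head? = l[mid]? := List.head?_drop
        rw [hymid] at this
        cases hd : l.drop mid with
        | nil =>
            rw [hd] at this; simp at this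
        | cons a as =>
            rw [hd] at this
            simp at this
            subst this
            have : as = l.drop (mid + 1) := by
              have := congrArg List.tail hd
              simpa [List.tail_drop] using this.symm
            rw [this]
      have hsplit : l = l.take mid ++ ymid :: l.drop (mid + 1) := by
        conv_lhs => rw [← List.take_append_drop mid l]
        rw [hdropeq]
      have hlast : (l.take mid).getLast? = l[mid - 1]? := by
        have hlt : (l.take mid).length = mid := by
          simp only [List.length_take]; omega
        rw [List.getLast?_eq_getElem?, hlt]
        exact List.getElem?_take_of_lt (by omega)
      conv_rhs => rw [hsplit]
      rw [runsRef_append, hlast, ← hdropeq, hymid]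

theorem pv_fold_runs (l : List String) (x : String) (c : Int) :
    ((x :: l).zip l).foldl (fun count pn => if pn.1 ≠ pn.2 then count + 1 else count) c
      = c + (runsRef (x :: l) - 1) := by
  induction l generalizing x c with
  | nil => simp [runsRef]
  | cons y t ih =>
      simp only [List.zip_cons_cons, List.foldl_cons]
      rw [ih]
      have : runsRef (x :: y :: t) = (if x ≠ y then 1 else 0) + runsRef (y :: t) := rfl
      rw [this]
      by_cases h : x = y <;> simp [h]

-- ===== VERDICT (by name: the statement is the Claim_ definition above) =====
theorem stagecount_spec : Claim_equal_stagecount := by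
  intro maps _
  unfold Spec_stagecount
  rw [alt_eq_ref]
  cases maps with
  | nil => simp [stagecount, runsRef]
  | cons x l =>
      simp only [stagecount, if_neg (List.cons_ne_nil x l), List.tail_cons]
      rw [pv_fold_runs]
      ring
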